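-- pv_equiv track=rewrite | github.com/Seaniok/prg-basics-UEK | 10-Test2/p10.py | f
-- ===== SOURCE A (Python) =====
-- def f(array):
--
--     min_number = float('inf')
--     min_row = -1
--     min_col = -1
--
--     for i in range(len(array)):
--         for j in range(len(array[i])):
--             current_num = array[i][j]
--
--             if current_num < min_number:
--                 min_number = current_num
--                 min_row = i
--                 min_col = j
--
--     return min_row == min_col
-- ===== SOURCE B (Python) =====
-- def f(array):
--     flat = [x for row in array for x in row]
--     if not flat:
--         return True
--     m = min(flat)
--     for i, row in enumerate(array):
--         if m in row:
--             return i == row.index(m)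
--     return True  # unreachable: m comes from some row
-- ===== Notes on version B (the rewrite author's own statement) =====
-- stated objective: alternative
-- what changed: Instead of one pass tracking a running (min, row, col) triple, B computes the global minimum of the flattened matrix and then locates its first row-major occurrence with 'in'/'index', returning True for an empty matrix.
import Mathlib
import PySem

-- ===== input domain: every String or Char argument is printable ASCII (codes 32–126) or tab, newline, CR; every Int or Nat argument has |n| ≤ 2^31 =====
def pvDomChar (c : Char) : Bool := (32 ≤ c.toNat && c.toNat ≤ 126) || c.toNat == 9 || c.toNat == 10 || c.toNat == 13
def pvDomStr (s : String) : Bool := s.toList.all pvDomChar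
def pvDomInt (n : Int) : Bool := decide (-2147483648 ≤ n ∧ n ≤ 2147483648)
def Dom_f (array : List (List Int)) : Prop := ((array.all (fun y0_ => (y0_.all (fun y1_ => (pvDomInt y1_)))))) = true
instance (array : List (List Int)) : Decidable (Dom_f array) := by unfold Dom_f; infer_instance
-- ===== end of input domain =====

-- B replaces A's single running-(min,row,col) scan by a global-min computation followed by a
-- first-occurrence search ('alternative' decomposition; same asymptotic cost).

-- ===== PORT A =====
-- literal transliteration of A: nested index loops tracking (min_number, min_row, min_col);
-- float('inf') is modelled as 'none' (any int is < inf).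
def f (array : List (List Int)) : Bool :=
  let s : Option Int × Int × Int :=
    (PySem.List.pyRange 0 (PySem.List.len array) 1).foldl (fun s i =>
      (PySem.List.pyRange 0 (PySem.List.len (PySem.List.pyGetD array i [])) 1).foldl (fun s j =>
        let current := PySem.List.pyGetD (PySem.List.pyGetD array i []) j 0
        match s.1 with
        | none => (some current, i, j)
        | some m => if current < m then (some current, i, j) else s) s) (none, -1, -1)
  s.2.1 == s.2.2

-- ===== PORT B =====
-- helper: the 'for i, row in enumerate(array): if m in row: return i == row.index(m)' loop of Source B
def findMinRow (m : Int) : List (Int × List Int) → Bool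
  | [] => true
  | (i, row) :: rest =>
    match PySem.List.index? row m with
    | some j => i == (j : Int)
    | none => findMinRow m rest

def f_alt (array : List (List Int)) : Bool :=
  let flat := array.flatMap (fun row => row)
  match PySem.List.min? flat (fun x => x) with
  | none => true
  | some m => findMinRow m (PySem.List.enumerate array)

-- ===== PRECONDITION & SPEC =====
def Spec_f (array : List (List Int)) (out : Bool) : Prop := out = f_alt array
instance (array : List (List Int)) (out : Bool) : Decidable (Spec_f array out) := by unfold Spec_f; infer_instance

-- ===== CLAIM (what is proved, stated in full; the proofs are below) =====
def Claim_equal_f : Prop := ∀ (array : List (List Int)), Dom_f array → Spec_f array (f array)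

-- ===== LEMMAS AND PROOFS =====

-- the fold step of A on a flattened enumerated entry (value, row, col)
def stepA (s : Option Int × Int × Int) (e : Int × Int × Int) : Option Int × Int × Int :=
  match s.1 with
  | none => (some e.1, e.2.1, e.2.2)
  | some m => if e.1 < m then (some e.1, e.2.1, e.2.2) else s

-- one row's entries, tagged with the row index
def rowE (i : Int) (row : List Int) : List (Int × Int × Int) :=
  (PySem.List.enumerate row 0).map (fun p => (p.2, i, p.1))

-- the whole matrix, flattened in row-major order with positions
def EE (array : List (List Int)) : List (Int × Int × Int) :=
  (PySem.List.enumerate array 0).flatMap (fun p => rowE p.1 p.2)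

theorem foldl_flatMap {α β γ : Type} (g : α → List β) (φ : γ → β → γ) :
    ∀ (xs : List α) (init : γ),
      (xs.flatMap g).foldl φ init = xs.foldl (fun s x => (g x).foldl φ s) init := by
  intro xs
  induction xs with
  | nil => intro init; rfl
  | cons x xs ih => intro init; simp [List.flatMap_cons, List.foldl_append, ih]

theorem inner_eq (i : Int) (row : List Int) (s : Option Int × Int × Int) :
    (PySem.List.pyRange 0 (PySem.List.len row) 1).foldl (fun s j =>
        let current := PySem.List.pyGetD row j 0
        match s.1 with
        | none => (some current, i, j)
        | some m => if current < m then (some current, i, j) else s) s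
      = (rowE i row).foldl stepA s := by
  rw [rowE, List.foldl_map, PySem.List.enumerate_eq_map_pyRange row 0, List.foldl_map]
  rfl

theorem outer_eq (array : List (List Int)) :
    (PySem.List.pyRange 0 (PySem.List.len array) 1).foldl (fun s i =>
      (PySem.List.pyRange 0 (PySem.List.len (PySem.List.pyGetD array i [])) 1).foldl (fun s j =>
        let current := PySem.List.pyGetD (PySem.List.pyGetD array i []) j 0
        match s.1 with
        | none => (some current, i, j)
        | some m => if current < m then (some current, i, j) else s) s) (none, -1, -1)
      = (EE array).foldl stepA (none, -1, -1) := by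
  rw [EE, foldl_flatMap, PySem.List.enumerate_eq_map_pyRange array [], List.foldl_map]
  congr 1
  funext s i
  exact inner_eq i (PySem.List.pyGetD array i []) s

theorem fold_stable (m r c : Int) :
    ∀ (E : List (Int × Int × Int)), (∀ e ∈ E, m ≤ e.1) →
      E.foldl stepA (some m, r, c) = (some m, r, c) := by
  intro E
  induction E with
  | nil => intro _; rfl
  | cons e E ih =>
    intro h
    have he : m ≤ e.1 := h e (List.mem_cons_self)
    have : stepA (some m, r, c) e = (some m, r, c) := by
      simp [stepA]; omega
    simp only [List.foldl_cons, this]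
    exact ih (fun e' he' => h e' (List.mem_cons_of_mem _ he'))

theorem fold_min (μ : Int) :
    ∀ (E : List (Int × Int × Int)), (∀ e ∈ E, μ ≤ e.1) → (∃ e ∈ E, e.1 = μ) →
      ∀ (m r c : Int), μ < m →
        E.foldl stepA (some m, r, c) =
          match E.find? (fun e => e.1 == μ) with
          | some e => (some μ, e.2.1, e.2.2)
          | none => (some m, r, c) := by
  intro E
  induction E with
  | nil =>
    intro _ hex
    simp at hex
  | cons e E ih =>
    intro hlb hex m r c hlt
    have he1 : μ ≤ e.1 := hlb e (List.mem_cons_self)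
    by_cases heq : e.1 = μ
    · -- first occurrence of the minimum: state updates, then stays
      have hstep : stepA (some m, r, c) e = (some μ, e.2.1, e.2.2) := by
        show (if e.1 < m then ((some e.1 : Option Int), e.2.1, e.2.2) else (some m, r, c)) = _
        rw [if_pos (by omega), heq]
      have hfind : (e :: E).find? (fun e => e.1 == μ) = some e := by
        simp [heq]
      rw [List.foldl_cons, hstep, hfind]
      exact fold_stable μ e.2.1 e.2.2 E (fun e' he' => hlb e' (List.mem_cons_of_mem _ he'))
    · have hlt' : μ < e.1 := lt_of_le_of_ne he1 (fun h => heq h.symm)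
      have hexE : ∃ e' ∈ E, e'.1 = μ := by
        rcases hex with ⟨e', he', hv⟩
        rcases List.mem_cons.mp he' with h | h
        · exact absurd (h ▸ hv) heq
        · exact ⟨e', h, hv⟩
      have hlbE : ∀ e' ∈ E, μ ≤ e'.1 := fun e' he' => hlb e' (List.mem_cons_of_mem _ he')
      have hfind : (e :: E).find? (fun e => e.1 == μ) = E.find? (fun e => e.1 == μ) := by
        simp [heq]
      rw [List.foldl_cons, hfind]
      by_cases hcm : e.1 < m
      · have hstep : stepA (some m, r, c) e = (some e.1, e.2.1, e.2.2) := by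
          simp [stepA, hcm]
        rw [hstep]
        obtain ⟨w, hw⟩ : ∃ w, E.find? (fun e => e.1 == μ) = some w := by
          rcases hexE with ⟨e', he', hv⟩
          exact Option.isSome_iff_exists.mp (List.find?_isSome.mpr ⟨e', he', by simp [hv]⟩)
        have h' := ih hlbE hexE e.1 e.2.1 e.2.2 hlt'
        rw [hw] at h' ⊢
        exact h'
      · have hstep : stepA (some m, r, c) e = (some m, r, c) := by
          simp [stepA]
          omega
        rw [hstep]
        exact ih hlbE hexE m r c hlt

theorem find_rowE (m : Int) (i : Int) (row : List Int) : ∀ (s : Int),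
    ((PySem.List.enumerate row s).map (fun p => (p.2, i, p.1))).find? (fun e => e.1 == m)
      = (PySem.List.index? row m).map (fun (j : Nat) => (m, i, s + (j : Int))) := by
  induction row with
  | nil => intro s; simp [PySem.List.enumerate_nil, PySem.List.index?]
  | cons x row ih =>
    intro s
    rw [PySem.List.enumerate_cons]
    by_cases hx : x = m
    · subst hx
      rw [PySem.List.index?_cons_self]
      simp
    · rw [PySem.List.index?_cons_of_ne row hx]
      simp only [List.map_cons, List.find?_cons]
      have : ((x, i, s).1 == m) = false := by simp [hx]
      simp only [this]
      rw [ih (s + 1), Option.map_map]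
      congr 1
      funext j
      simp [Function.comp]
      omega

theorem findMinRow_eq (m : Int) :
    ∀ (array : List (List Int)) (s : Int),
      findMinRow m (PySem.List.enumerate array s)
        = match ((PySem.List.enumerate array s).flatMap (fun p => rowE p.1 p.2)).find?
            (fun e => e.1 == m) with
          | some e => (e.2.1 == e.2.2)
          | none => true := by
  intro array
  induction array with
  | nil => intro s; simp [PySem.List.enumerate_nil, findMinRow]
  | cons row rest ih =>
    intro s
    rw [PySem.List.enumerate_cons]
    simp only [List.flatMap_cons, List.find?_append, findMinRow]
    have hrow : (rowE s row).find? (fun e => e.1 == m)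
        = (PySem.List.index? row m).map (fun (j : Nat) => (m, s, (0 : Int) + (j : Int))) :=
      find_rowE m s row 0
    cases hidx : PySem.List.index? row m with
    | none =>
      rw [hidx] at hrow
      simp only [hrow, Option.map_none, Option.none_or]
      exact ih (s + 1)
    | some j =>
      rw [hidx] at hrow
      simp [hrow]

theorem flat_eq (array : List (List Int)) : ∀ (s : Int),
    ((PySem.List.enumerate array s).flatMap (fun p => rowE p.1 p.2)).map (fun e => e.1)
      = array.flatMap (fun row => row) := by
  induction array with
  | nil => intro s; simp [PySem.List.enumerate_nil]
  | cons row rest ih =>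
    intro s
    rw [PySem.List.enumerate_cons]
    simp only [List.flatMap_cons, List.map_append, ih (s + 1)]
    congr 1
    simp [rowE, List.map_map]
    exact PySem.List.map_snd_enumerate row 0

theorem main_eq (array : List (List Int)) : f array = f_alt array := by
  simp only [f, f_alt]
  rw [outer_eq array]
  have hflat : (EE array).map (fun e => e.1) = array.flatMap (fun row => row) := flat_eq array 0
  cases hE : EE array with
  | nil =>
    have : array.flatMap (fun row => row) = [] := by rw [← hflat, hE]; rfl
    rw [this]
    simp [PySem.List.min?]
  | cons e E' =>
    -- the flattened list is nonempty, so min? returns its minimum μ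
    have hne : array.flatMap (fun row => row) ≠ [] := by
      rw [← hflat, hE]; simp
    obtain ⟨μ, hμ⟩ : ∃ μ, PySem.List.min? (array.flatMap (fun row => row)) (fun x => x) = some μ := by
      cases h : PySem.List.min? (array.flatMap (fun row => row)) (fun x => x) with
      | none => exact absurd ((PySem.List.min?_eq_none_iff _ _).mp h) hne
      | some μ => exact ⟨μ, rfl⟩
    have hmem : μ ∈ array.flatMap (fun row => row) := PySem.List.min?_mem hμ
    have hmin : ∀ y ∈ array.flatMap (fun row => row), μ ≤ y := PySem.List.min?_isMin hμ
    have hlb : ∀ e' ∈ e :: E', μ ≤ e'.1 := by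
      intro e' he'
      exact hmin e'.1 (by rw [← hflat, hE]; exact List.mem_map_of_mem he')
    have hex : ∃ e' ∈ e :: E', e'.1 = μ := by
      rw [← hflat, hE] at hmem
      rcases List.mem_map.mp hmem with ⟨e', he', hv⟩
      exact ⟨e', he', hv⟩
    have hB : findMinRow μ (PySem.List.enumerate array)
        = match (EE array).find? (fun e => e.1 == μ) with
          | some e => (e.2.1 == e.2.2)
          | none => true := findMinRow_eq μ array 0
    rw [hE] at hB
    have hred : (match some μ with
        | none => true
        | some m => findMinRow m (PySem.List.enumerate array)) = findMinRow μ (PySem.List.enumerate array) := rfl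
    rw [hμ, hred, hB]
    rw [List.foldl_cons]
    have hstep0 : stepA (none, -1, -1) e = (some e.1, e.2.1, e.2.2) := rfl
    rw [hstep0]
    by_cases heq : e.1 = μ
    · have hfind : (e :: E').find? (fun e => e.1 == μ) = some e := by
        simp [heq]
      rw [hfind, fold_stable e.1 e.2.1 e.2.2 E'
        (fun e' he' => heq ▸ hlb e' (List.mem_cons_of_mem _ he'))]
    · have hlt : μ < e.1 :=
        lt_of_le_of_ne (hlb e (List.mem_cons_self)) (fun h => heq h.symm)
      have hexE : ∃ e' ∈ E', e'.1 = μ := by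
        rcases hex with ⟨e', he', hv⟩
        rcases List.mem_cons.mp he' with h | h
        · exact absurd (h ▸ hv) heq
        · exact ⟨e', h, hv⟩
      have hfind : (e :: E').find? (fun e => e.1 == μ) = E'.find? (fun e => e.1 == μ) := by
        simp [heq]
      rw [hfind]
      obtain ⟨w, hw⟩ : ∃ w, E'.find? (fun e => e.1 == μ) = some w := by
        rcases hexE with ⟨e', he', hv⟩
        exact Option.isSome_iff_exists.mp (List.find?_isSome.mpr ⟨e', he', by simp [hv]⟩)
      have h' := fold_min μ E' (fun e' he' => hlb e' (List.mem_cons_of_mem _ he')) hexE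
        e.1 e.2.1 e.2.2 hlt
      rw [hw] at h' ⊢
      rw [h']

-- ===== VERDICT (by name: the statement is the Claim_ definition above) =====
theorem f_spec : Claim_equal_f := by
  intro array _
  exact main_eq array
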